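-- pv_equiv track=rewrite | github.com/ScrollPrize/villa | lasagna/lasagna3d/dataset_overlap.py | _candidate_pairs
-- ===== SOURCE A (Python) =====
-- def _candidate_pairs(info: list[dict], seg_idx: list[int]) -> list[tuple[int, int]]:
--     pairs: list[tuple[int, int]] = []
--     n = len(info)
--     for i in range(n):
--         for j in range(i + 1, n):
--             if info[i].get("chain", -1) != info[j].get("chain", -2):
--                 continue
--             if abs(int(info[i]["pos"]) - int(info[j]["pos"])) != 1:
--                 continue
--             if seg_idx[i] == seg_idx[j]:
--                 continue
--             pairs.append((i, j))
--     return pairs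
-- ===== SOURCE B (Python) =====
-- def _candidate_pairs(info: list[dict], seg_idx: list[int]) -> list[tuple[int, int]]:
--     # Index every entry (that carries a position) by its (chain-as-j, pos) key,
--     # so each i only looks up the two adjacent-position buckets instead of
--     # scanning all j > i.  Defaults mirror A's .get("chain", -1/-2) convention.
--     groups: dict[tuple[int, int], list[int]] = {}
--     for k, d in enumerate(info):
--         if "pos" in d:
--             key = (d.get("chain", -2), int(d["pos"]))
--             groups[key] = groups.get(key, []) + [k]
--     pairs: list[tuple[int, int]] = []
--     for i, d in enumerate(info):
--         if "pos" not in d: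
--             continue
--         c = d.get("chain", -1)
--         p = int(d["pos"])
--         cand = [j for q in (p - 1, p + 1)
--                 for j in groups.get((c, q), [])
--                 if i < j and seg_idx[i] != seg_idx[j]]
--         cand.sort()
--         pairs.extend((i, j) for j in cand)
--     return pairs
-- ===== Notes on version B (the rewrite author's own statement) =====
-- stated objective: alternative
-- what changed: Replaces the all-pairs double loop by a dictionary index from (chain,pos) to index lists built in one pass; each i then inspects only the two adjacent-position buckets and sorts its few candidates.
import Mathlib
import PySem

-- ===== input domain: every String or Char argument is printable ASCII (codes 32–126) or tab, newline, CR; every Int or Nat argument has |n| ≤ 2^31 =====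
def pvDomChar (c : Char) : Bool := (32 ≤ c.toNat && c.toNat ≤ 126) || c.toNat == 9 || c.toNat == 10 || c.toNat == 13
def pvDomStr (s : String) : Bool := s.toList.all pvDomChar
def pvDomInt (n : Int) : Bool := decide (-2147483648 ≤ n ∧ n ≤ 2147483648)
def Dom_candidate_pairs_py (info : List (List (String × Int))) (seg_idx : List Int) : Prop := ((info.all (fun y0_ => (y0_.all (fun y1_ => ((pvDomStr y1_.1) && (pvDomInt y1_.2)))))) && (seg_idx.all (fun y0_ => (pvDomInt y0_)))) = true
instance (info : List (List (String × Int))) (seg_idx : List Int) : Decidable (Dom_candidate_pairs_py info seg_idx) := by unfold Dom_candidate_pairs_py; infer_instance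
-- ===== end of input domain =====

-- B replaces A's all-pairs double loop by a (chain,pos)→indices hash index; return values proved equal on Pre_ (exactly where A returns without raising).

-- shared dict-access helpers (each Python dict is a PySem.Dict over its association list)
def pvDict (d : List (String × Int)) : PySem.Dict String Int := PySem.Dict.mk d
-- d.get("chain", -1) / d.get("chain", -2)
def pvCI (d : List (String × Int)) : Int := (pvDict d).getD "chain" (-1)
def pvCJ (d : List (String × Int)) : Int := (pvDict d).getD "chain" (-2)
-- d["pos"] (KeyError excluded by Pre_; int() on an int is the identity)
def pvPosD (d : List (String × Int)) : Int := (pvDict d).getD "pos" 0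

-- ===== PORT A =====
def candidate_pairs_py (info : List (List (String × Int))) (seg_idx : List Int) : List (Int × Int) :=
  let n : Int := info.length
  (PySem.List.pyRange 0 n 1).foldl (fun pairs i =>
    (PySem.List.pyRange (i + 1) n 1).foldl (fun pairs j =>
      let di := PySem.List.pyGetD info i []
      let dj := PySem.List.pyGetD info j []
      if pvCI di ≠ pvCJ dj then pairs
      else if |pvPosD di - pvPosD dj| ≠ 1 then pairs
      else if PySem.List.pyGetD seg_idx i 0 = PySem.List.pyGetD seg_idx j 0 then pairs
      else pairs ++ [(i, j)]) pairs) []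

-- ===== PORT B =====
def candidate_pairs_py_alt (info : List (List (String × Int))) (seg_idx : List Int) : List (Int × Int) :=
  -- groups[key] = groups.get(key, []) + [k]
  let groups : PySem.Dict (Int × Int) (List Int) :=
    (PySem.List.enumerate info 0).foldl (fun g kd =>
      if (pvDict kd.2).contains "pos" then
        g.modify (pvCJ kd.2, pvPosD kd.2) [] (· ++ [kd.1])
      else g) PySem.Dict.empty
  (PySem.List.enumerate info 0).foldl (fun pairs id_ =>
    if (pvDict id_.2).contains "pos" then
      let c := pvCI id_.2
      let p := pvPosD id_.2
      let cand := ([p - 1, p + 1].flatMap (fun q => groups.getD (c, q) [])).filter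
        (fun j => decide (id_.1 < j) && !(PySem.List.pyGetD seg_idx id_.1 0 == PySem.List.pyGetD seg_idx j 0))
      pairs ++ (PySem.List.sorted cand (fun x => x) false).map (fun j => (id_.1, j))
    else pairs) []

-- ===== PRECONDITION & SPEC =====
-- Pre_ holds exactly when Python A returns: whenever a pair i<j matches on chain
-- (with A's .get defaults), both dicts must carry "pos" (else KeyError), and if the
-- positions are adjacent, seg_idx must be long enough (else IndexError).
def Pre_candidate_pairs_py (info : List (List (String × Int))) (seg_idx : List Int) : Prop :=
  ((List.range info.length).all fun i => (List.range info.length).all fun j =>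
    !(decide (i < j) && (pvCI (info.getD i []) == pvCJ (info.getD j []))) ||
    ((pvDict (info.getD i [])).contains "pos" &&
     (pvDict (info.getD j [])).contains "pos" &&
     (!(|pvPosD (info.getD i []) - pvPosD (info.getD j [])| == 1) || decide (j < seg_idx.length)))) = true
instance (info : List (List (String × Int))) (seg_idx : List Int) : Decidable (Pre_candidate_pairs_py info seg_idx) := by unfold Pre_candidate_pairs_py; infer_instance

def pvWitness_candidate_pairs_py : (List (List (String × Int))) × List Int :=
  ([[("chain", 1), ("pos", 0)], [("chain", 1), ("pos", 1)]], [0, 1])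

def Spec_candidate_pairs_py (info : List (List (String × Int))) (seg_idx : List Int) (out : List (Int × Int)) : Prop := out = candidate_pairs_py_alt info seg_idx
instance (info : List (List (String × Int))) (seg_idx : List Int) (out : List (Int × Int)) : Decidable (Spec_candidate_pairs_py info seg_idx out) := by unfold Spec_candidate_pairs_py; infer_instance

-- ===== CLAIM (what is proved, stated in full; the proofs are below) =====
def Claim_equal_candidate_pairs_py : Prop := ∀ (info : List (List (String × Int))) (seg_idx : List Int), Dom_candidate_pairs_py info seg_idx → Pre_candidate_pairs_py info seg_idx → Spec_candidate_pairs_py info seg_idx (candidate_pairs_py info seg_idx)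

-- ===== LEMMAS AND PROOFS =====

-- the pair test of A, as one boolean over Int indices
def pvOk (info : List (List (String × Int))) (seg : List Int) (i j : Int) : Bool :=
  (pvCI (PySem.List.pyGetD info i []) == pvCJ (PySem.List.pyGetD info j [])) &&
  (|pvPosD (PySem.List.pyGetD info i []) - pvPosD (PySem.List.pyGetD info j [])| == 1) &&
  !(PySem.List.pyGetD seg i 0 == PySem.List.pyGetD seg j 0)

-- A as a flatMap of filters
lemma A_flat (info : List (List (String × Int))) (seg : List Int) :
    candidate_pairs_py info seg =
      (PySem.List.pyRange 0 (info.length : Int) 1).flatMap (fun i =>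
        ((PySem.List.pyRange (i + 1) (info.length : Int) 1).filter (pvOk info seg i)).map
          (fun j => (i, j))) := by
  unfold candidate_pairs_py
  have hstep : ∀ i : Int,
      (fun (pairs : List (Int × Int)) (j : Int) =>
        if pvCI (PySem.List.pyGetD info i []) ≠ pvCJ (PySem.List.pyGetD info j []) then pairs
        else if |pvPosD (PySem.List.pyGetD info i []) - pvPosD (PySem.List.pyGetD info j [])| ≠ 1 then pairs
        else if PySem.List.pyGetD seg i 0 = PySem.List.pyGetD seg j 0 then pairs
        else pairs ++ [(i, j)]) =
      fun pairs j => if pvOk info seg i j then pairs ++ [(i, j)] else pairs := by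
    intro i; funext pairs j
    by_cases h1 : pvCI (PySem.List.pyGetD info i []) = pvCJ (PySem.List.pyGetD info j []) <;>
      by_cases h2 : |pvPosD (PySem.List.pyGetD info i []) - pvPosD (PySem.List.pyGetD info j [])| = 1 <;>
      by_cases h3 : PySem.List.pyGetD seg i 0 = PySem.List.pyGetD seg j 0 <;>
      simp [pvOk, h1, h2, h3]
  simp only [hstep, PySem.List.foldl_append_if, PySem.List.foldl_append_eq_flatMap,
    List.nil_append]

-- a foldl that skips non-p elements is a foldl over the filter
lemma foldl_filter_if {α β : Type} (p : α → Bool) (f : β → α → β) (l : List α) (b : β) :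
    l.foldl (fun acc x => if p x then f acc x else acc) b = (l.filter p).foldl f b := by
  induction l generalizing b with
  | nil => rfl
  | cons x xs ih => by_cases h : p x <;> simp [h, ih]

-- filter with a disjunction of disjoint tests splits into two filters
lemma filter_or_perm {α : Type} (a b : α → Bool) (l : List α)
    (hdis : ∀ x ∈ l, ¬(a x = true ∧ b x = true)) :
    (l.filter (fun x => a x || b x)).Perm (l.filter a ++ l.filter b) := by
  induction l with
  | nil => simp
  | cons x xs ih =>
    have hd : ∀ y ∈ xs, ¬(a y = true ∧ b y = true) := fun y hy => hdis y (by simp [hy])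
    by_cases ha : a x = true
    · have hb : b x = false := by
        rcases Bool.eq_false_or_eq_true (b x) with h | h
        · exact absurd ⟨ha, h⟩ (hdis x (by simp))
        · exact h
      simpa [ha, hb] using (ih hd).cons x
    · have ha' : a x = false := by simpa using ha
      by_cases hb : b x = true
      · have h1 : (List.filter (fun x => a x || b x) (x :: xs)).Perm
            (x :: (List.filter a xs ++ List.filter b xs)) := by
          simpa [ha', hb] using (ih hd).cons x
        have h2 : (x :: (List.filter a xs ++ List.filter b xs)).Perm
            (List.filter a xs ++ x :: List.filter b xs) := List.perm_middle.symm
        simpa [ha', hb] using h1.trans h2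
      · have hb' : b x = false := by simpa using hb
        simpa [ha', hb'] using ih hd

-- the content of Pre_, unpacked
lemma pre_unpack {info : List (List (String × Int))} {seg_idx : List Int}
    (h : Pre_candidate_pairs_py info seg_idx) :
    ∀ i : Nat, i < info.length → ∀ j : Nat, j < info.length → i < j →
      pvCI (info.getD i []) = pvCJ (info.getD j []) →
      ((pvDict (info.getD i [])).contains "pos" = true ∧
       (pvDict (info.getD j [])).contains "pos" = true ∧
       (|pvPosD (info.getD i []) - pvPosD (info.getD j [])| = 1 → j < seg_idx.length)) := by
  intro i hi j hj hij hc
  unfold Pre_candidate_pairs_py at h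
  rw [List.all_eq_true] at h
  have h1 := h i (by simpa using hi)
  rw [List.all_eq_true] at h1
  have h2 := h1 j (by simpa using hj)
  simp only [hij, hc, decide_true, Bool.and_eq_true, Bool.or_eq_true, Bool.not_eq_true',
    beq_eq_false_iff_ne, ne_eq, decide_eq_true_eq] at h2
  rcases h2 with h | ⟨⟨hp1, hp2⟩, hd⟩
  · simp at h
  · exact ⟨hp1, hp2, fun habs => hd.resolve_left (not_not_intro habs)⟩

-- the bucket list of B's groups dict
lemma groups_getD (info : List (List (String × Int))) (c q : Int) :
    (((PySem.List.enumerate info 0).foldl (fun g kd =>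
        if (pvDict kd.2).contains "pos" then
          g.modify (pvCJ kd.2, pvPosD kd.2) [] (· ++ [kd.1])
        else g) PySem.Dict.empty).getD (c, q) []) =
      (PySem.List.pyRange 0 (info.length : Int) 1).filter (fun k =>
        (pvDict (PySem.List.pyGetD info k [])).contains "pos" &&
        (pvCJ (PySem.List.pyGetD info k []) == c) &&
        (pvPosD (PySem.List.pyGetD info k []) == q)) := by
  rw [foldl_filter_if]
  have hf : (fun (g : PySem.Dict (Int × Int) (List Int)) (kd : Int × List (String × Int)) =>
      g.modify (pvCJ kd.2, pvPosD kd.2) [] (· ++ [kd.1])) =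
      fun g kd => (fun (d : PySem.Dict (Int × Int) (List Int)) (p : (Int × Int) × Int) =>
        d.modify p.1 [] (· ++ [p.2])) g
        ((fun kd : Int × List (String × Int) => ((pvCJ kd.2, pvPosD kd.2), kd.1)) kd) := rfl
  rw [hf, ← List.foldl_map (f := fun kd : Int × List (String × Int) => ((pvCJ kd.2, pvPosD kd.2), kd.1))
    (g := fun (d : PySem.Dict (Int × Int) (List Int)) (p : (Int × Int) × Int) => d.modify p.1 [] (· ++ [p.2])),
    PySem.Dict.getD_foldl_modify_append, PySem.Dict.getD_empty,
    List.nil_append, PySem.List.enumerate_eq_map_pyRange info ([] : List (String × Int))]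
  simp only [List.filter_map, List.map_map, List.filter_filter, Function.comp_def]
  rw [show (fun (x : Int) => (((pvCJ (PySem.List.pyGetD info x []), pvPosD (PySem.List.pyGetD info x [])), x) : (Int × Int) × Int).2) = fun x => x from rfl, List.map_id']
  apply List.filter_congr
  intro k _
  have hb : ((pvCJ (PySem.List.pyGetD info k []), pvPosD (PySem.List.pyGetD info k [])) == (c, q)) =
      ((pvCJ (PySem.List.pyGetD info k []) == c) && (pvPosD (PySem.List.pyGetD info k []) == q)) := rfl
  by_cases hp : (pvDict (PySem.List.pyGetD info k [])).contains "pos" <;>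
    by_cases hc : pvCJ (PySem.List.pyGetD info k []) = c <;>
    by_cases hq : pvPosD (PySem.List.pyGetD info k []) = q <;>
    simp [hp, hc, hq, hb]

-- proof-side abbreviations for B's pieces
def pvGrp (info : List (List (String × Int))) (c q : Int) : List Int :=
  (PySem.List.pyRange 0 (info.length : Int) 1).filter (fun k =>
    (pvDict (PySem.List.pyGetD info k [])).contains "pos" &&
    (pvCJ (PySem.List.pyGetD info k []) == c) &&
    (pvPosD (PySem.List.pyGetD info k []) == q))

def pvPred (seg : List Int) (i : Int) : Int → Bool := fun j =>
  decide (i < j) && !(PySem.List.pyGetD seg i 0 == PySem.List.pyGetD seg j 0)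

def pvG (info : List (List (String × Int))) (seg : List Int) (i : Int) : List (Int × Int) :=
  if (pvDict (PySem.List.pyGetD info i [])).contains "pos" then
    (PySem.List.sorted
      ((pvGrp info (pvCI (PySem.List.pyGetD info i [])) (pvPosD (PySem.List.pyGetD info i []) - 1) ++
        pvGrp info (pvCI (PySem.List.pyGetD info i [])) (pvPosD (PySem.List.pyGetD info i []) + 1)).filter
        (pvPred seg i)) (fun x => x)).map (fun j => (i, j))
  else []

lemma flatMap_congr' {α β : Type} {f g : α → List β} (l : List α) (h : ∀ x ∈ l, f x = g x) :
    l.flatMap f = l.flatMap g := by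
  induction l with
  | nil => rfl
  | cons x xs ih => simp [h x (by simp), ih (fun y hy => h y (by simp [hy]))]

-- B as a flatMap of per-index blocks
lemma foldl_append_if_flat {α β : Type} (p : α → Bool) (f : α → List β) (l : List α) (acc : List β) :
    l.foldl (fun acc x => if p x then acc ++ f x else acc) acc =
      acc ++ l.flatMap (fun x => if p x then f x else []) := by
  induction l generalizing acc with
  | nil => simp
  | cons x xs ih => by_cases h : p x <;> simp [h, ih]

lemma B_flat (info : List (List (String × Int))) (seg : List Int) :
    candidate_pairs_py_alt info seg =
      (PySem.List.pyRange 0 (info.length : Int) 1).flatMap (pvG info seg) := by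
  unfold candidate_pairs_py_alt
  simp only [groups_getD]
  rw [foldl_append_if_flat, List.nil_append,
    PySem.List.enumerate_eq_map_pyRange info ([] : List (String × Int)), List.flatMap_map]
  refine flatMap_congr' _ (fun i _ => ?_)
  by_cases h : (pvDict (PySem.List.pyGetD info i [])).contains "pos" <;>
    simp [pvG, pvGrp, pvPred, h]

-- the per-index block of B equals the per-index filter of A
lemma per_i (info : List (List (String × Int))) (seg : List Int)
    (hpre : Pre_candidate_pairs_py info seg) {i : Int} (h0 : 0 ≤ i) (hin : i < (info.length : Int)) :
    pvG info seg i =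
      ((PySem.List.pyRange (i + 1) (info.length : Int) 1).filter (pvOk info seg i)).map
        (fun j => (i, j)) := by
  have hPre : ∀ k : Int, i < k → k < (info.length : Int) →
      pvCI (PySem.List.pyGetD info i []) = pvCJ (PySem.List.pyGetD info k []) →
      ((pvDict (PySem.List.pyGetD info i [])).contains "pos" = true ∧
       (pvDict (PySem.List.pyGetD info k [])).contains "pos" = true ∧
       (|pvPosD (PySem.List.pyGetD info i []) - pvPosD (PySem.List.pyGetD info k [])| = 1 →
         (k.toNat) < seg.length)) := by
    intro k hik hkn hc
    have e_i : PySem.List.pyGetD info i [] = info.getD i.toNat [] :=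
      PySem.List.pyGetD_of_nonneg info [] h0
    have e_k : PySem.List.pyGetD info k [] = info.getD k.toNat [] :=
      PySem.List.pyGetD_of_nonneg info [] (by omega)
    rw [e_i, e_k] at hc ⊢
    exact pre_unpack hpre i.toNat (by omega) k.toNat (by omega) (by omega) hc
  by_cases hp : (pvDict (PySem.List.pyGetD info i [])).contains "pos" = true
  case neg =>
    have hnil : (PySem.List.pyRange (i + 1) (info.length : Int) 1).filter (pvOk info seg i) = [] := by
      rw [List.filter_eq_nil_iff]
      intro k hk hok
      rcases PySem.List.mem_pyRange_one.mp hk with ⟨h1, h2⟩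
      have hc : pvCI (PySem.List.pyGetD info i []) = pvCJ (PySem.List.pyGetD info k []) := by
        simp only [pvOk, Bool.and_eq_true, beq_iff_eq] at hok
        exact hok.1.1
      exact hp (hPre k (by omega) h2 hc).1
    simp [pvG, hp, hnil]
  case pos =>
    unfold pvG
    rw [if_pos hp]
    congr 1
    apply PySem.List.sorted_eq_of_perm_of_pairwise_lt
    · -- the filtered range is a rearrangement of B's two buckets
      rw [List.filter_append]
      have restrict : ∀ q : Int,
          (pvGrp info (pvCI (PySem.List.pyGetD info i [])) q).filter (pvPred seg i) =
          (PySem.List.pyRange (i + 1) (info.length : Int) 1).filter (fun k =>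
            pvPred seg i k &&
            ((pvDict (PySem.List.pyGetD info k [])).contains "pos" &&
             (pvCJ (PySem.List.pyGetD info k []) == pvCI (PySem.List.pyGetD info i [])) &&
             (pvPosD (PySem.List.pyGetD info k []) == q))) := by
        intro q
        unfold pvGrp
        rw [List.filter_filter,
          PySem.List.pyRange_one_append 0 (i + 1) (info.length : Int) (by omega) (by omega),
          List.filter_append]
        have h1 : (PySem.List.pyRange 0 (i + 1) 1).filter (fun k =>
            pvPred seg i k &&
            ((pvDict (PySem.List.pyGetD info k [])).contains "pos" &&
             (pvCJ (PySem.List.pyGetD info k []) == pvCI (PySem.List.pyGetD info i [])) &&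
             (pvPosD (PySem.List.pyGetD info k []) == q))) = [] := by
          rw [List.filter_eq_nil_iff]
          intro k hk hand
          rcases PySem.List.mem_pyRange_one.mp hk with ⟨_, h2⟩
          simp only [pvPred, Bool.and_eq_true, decide_eq_true_eq] at hand
          omega
        rw [h1, List.nil_append]
      rw [restrict, restrict]
      have hok : ∀ k ∈ PySem.List.pyRange (i + 1) (info.length : Int) 1,
          pvOk info seg i k =
          ((pvPred seg i k &&
            ((pvDict (PySem.List.pyGetD info k [])).contains "pos" &&
             (pvCJ (PySem.List.pyGetD info k []) == pvCI (PySem.List.pyGetD info i [])) &&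
             (pvPosD (PySem.List.pyGetD info k []) == pvPosD (PySem.List.pyGetD info i []) - 1))) ||
           (pvPred seg i k &&
            ((pvDict (PySem.List.pyGetD info k [])).contains "pos" &&
             (pvCJ (PySem.List.pyGetD info k []) == pvCI (PySem.List.pyGetD info i [])) &&
             (pvPosD (PySem.List.pyGetD info k []) == pvPosD (PySem.List.pyGetD info i []) + 1)))) := by
        intro k hk
        rcases PySem.List.mem_pyRange_one.mp hk with ⟨h1, h2⟩
        have hik : i < k := by omega
        rw [Bool.eq_iff_iff]
        simp only [pvOk, pvPred, Bool.and_eq_true, Bool.or_eq_true, beq_iff_eq,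
          decide_eq_true_eq, Bool.not_eq_true', beq_eq_false_iff_ne, ne_eq]
        constructor
        · rintro ⟨⟨hc, habs⟩, hsegne⟩
          rcases hPre k hik h2 hc with ⟨_, hpk, _⟩
          rcases (abs_eq (by norm_num : (0:Int) ≤ 1)).mp habs with h | h
          · exact Or.inl ⟨⟨hik, hsegne⟩, ⟨hpk, hc.symm⟩, by omega⟩
          · exact Or.inr ⟨⟨hik, hsegne⟩, ⟨hpk, hc.symm⟩, by omega⟩
        · rintro (⟨⟨_, hsegne⟩, ⟨hpk, hcj⟩, hpos⟩ | ⟨⟨_, hsegne⟩, ⟨hpk, hcj⟩, hpos⟩) <;>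
            exact ⟨⟨hcj.symm, by rw [abs_eq (by norm_num : (0:Int) ≤ 1)]; omega⟩, hsegne⟩
      rw [List.filter_congr hok]
      apply filter_or_perm
      intro k _ h
      rcases h with ⟨ha, hb⟩
      simp only [Bool.and_eq_true, beq_iff_eq] at ha hb
      omega
    · exact List.Pairwise.sublist List.filter_sublist
        (PySem.List.pairwise_lt_pyRange_one (i + 1) (info.length : Int))

-- ===== VERDICT (by name: the statement is the Claim_ definition above) =====
theorem candidate_pairs_py_spec : Claim_equal_candidate_pairs_py := by
  intro info seg _ hpre
  unfold Spec_candidate_pairs_py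
  rw [A_flat, B_flat]
  refine (flatMap_congr' _ (fun i hi => ?_)).symm
  rcases PySem.List.mem_pyRange_one.mp hi with ⟨h0, hin⟩
  exact per_i info seg hpre h0 hin
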